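-- pv_equiv track=rewrite | github.com/jsnider3/JavaWorkspace | Competitive/Python/strings.py | is_funny
-- ===== SOURCE A (Python) =====
-- def is_funny(word):
--   ''' As per https://www.hackerrank.com/challenges/funny-string.'''
--   assert len(word) > 1
--   rev = word[::-1]
--   for ind in range(len(word) - 1):
--     if (abs(ord(word[ind + 1]) - ord(word[ind])) !=
--         abs(ord(rev[ind + 1]) - ord(rev[ind]))):
--       return False
--   return True
-- ===== SOURCE B (Python) =====
-- def is_funny(word):
--   ''' As per https://www.hackerrank.com/challenges/funny-string.'''
--   assert len(word) > 1
--   lo, hi = 0, len(word) - 2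
--   while lo < hi:
--     if abs(ord(word[lo + 1]) - ord(word[lo])) != abs(ord(word[hi + 1]) - ord(word[hi])):
--       return False
--     lo += 1
--     hi -= 1
--   return True
-- ===== Notes on version B (the rewrite author's own statement) =====
-- stated objective: alternative
-- what changed: B is a two-pointer scan that walks inward from both ends of the original string comparing mirrored adjacent abs-diffs in place (half the comparisons, no reversed copy), instead of materializing the reversed string and scanning all n-1 positions against it.
import Mathlib
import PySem

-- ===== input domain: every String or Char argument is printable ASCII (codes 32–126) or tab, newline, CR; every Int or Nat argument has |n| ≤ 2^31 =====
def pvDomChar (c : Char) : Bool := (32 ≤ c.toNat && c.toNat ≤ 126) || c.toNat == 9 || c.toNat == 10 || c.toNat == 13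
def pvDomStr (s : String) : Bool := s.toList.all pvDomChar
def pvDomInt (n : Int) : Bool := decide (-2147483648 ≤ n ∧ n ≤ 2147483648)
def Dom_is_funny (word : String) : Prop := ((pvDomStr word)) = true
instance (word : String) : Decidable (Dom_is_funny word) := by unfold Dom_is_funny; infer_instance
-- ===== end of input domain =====

-- B is a two-pointer scan walking inward from both ends of the original string,
-- comparing mirrored adjacent abs-diffs in place (no reversed copy) — objective: alternative.

-- shared helper: abs(ord(cs[i+1]) - ord(cs[i])) (indices always in range where used)
def pvDiff (cs : List Char) (i : Nat) : Int :=
  |((cs.getD (i + 1) default).toNat : Int) - ((cs.getD i default).toNat : Int)|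

-- ===== PORT A =====
-- the for-loop with early 'return False'
def isFunnyLoop (cs rs : List Char) : List Nat → Bool
  | [] => true
  | i :: t => if pvDiff cs i ≠ pvDiff rs i then false else isFunnyLoop cs rs t

def is_funny (word : String) : Bool :=
  let cs := word.toList
  let rev := cs.reverse
  isFunnyLoop cs rev (List.range (cs.length - 1))

-- ===== PORT B =====
-- the while-loop with two pointers lo, hi and early 'return False'
def twoPtr (cs : List Char) (lo hi : Nat) : Bool :=
  if lo < hi then
    if pvDiff cs lo ≠ pvDiff cs hi then false
    else twoPtr cs (lo + 1) (hi - 1)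
  else true
termination_by hi - lo

def is_funny_alt (word : String) : Bool :=
  let cs := word.toList
  twoPtr cs 0 (cs.length - 2)

-- ===== PRECONDITION & SPEC =====
-- Pre_ excludes exactly the strings of length ≤ 1, on which A's length assertion raises AssertionError.
def Pre_is_funny (word : String) : Prop := 1 < word.toList.length
instance (word : String) : Decidable (Pre_is_funny word) := by unfold Pre_is_funny; infer_instance

def pvWitness_is_funny : String := "acxy"

def Spec_is_funny (word : String) (out : Bool) : Prop := out = is_funny_alt word
instance (word : String) (out : Bool) : Decidable (Spec_is_funny word out) := by unfold Spec_is_funny; infer_instance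

-- ===== CLAIM (what is proved, stated in full; the proofs are below) =====
def Claim_equal_is_funny : Prop := ∀ (word : String), Dom_is_funny word → Pre_is_funny word → Spec_is_funny word (is_funny word)

-- ===== LEMMAS AND PROOFS =====

theorem isFunnyLoop_eq_all (cs rs : List Char) (l : List Nat) :
    isFunnyLoop cs rs l = l.all (fun i => pvDiff cs i == pvDiff rs i) := by
  induction l with
  | nil => rfl
  | cons i t ih =>
    simp only [isFunnyLoop, List.all_cons, ih]
    by_cases h : pvDiff cs i = pvDiff rs i <;> simp [h]

theorem pvDiff_reverse (cs : List Char) (i : Nat) (h : i + 1 < cs.length) :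
    pvDiff cs.reverse i = pvDiff cs (cs.length - 2 - i) := by
  have e1 : cs.length - 1 - (i + 1) = cs.length - 2 - i := by omega
  have e2 : cs.length - 1 - i = cs.length - 2 - i + 1 := by omega
  have h1 : cs.reverse.getD (i + 1) default = cs.getD (cs.length - 2 - i) default := by
    simp only [List.getD_eq_getElem?_getD]
    rw [List.getElem?_reverse (show i + 1 < cs.length from h), e1]
  have h2 : cs.reverse.getD i default = cs.getD (cs.length - 2 - i + 1) default := by
    simp only [List.getD_eq_getElem?_getD]
    rw [List.getElem?_reverse (show i < cs.length by omega), e2]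
  simp only [pvDiff, h1, h2]
  exact abs_sub_comm _ _

-- A's loop is true iff the diff sequence is a palindrome
theorem funnyA_iff (cs : List Char) :
    isFunnyLoop cs cs.reverse (List.range (cs.length - 1)) = true
      ↔ ∀ i < cs.length - 1, pvDiff cs i = pvDiff cs (cs.length - 2 - i) := by
  rw [isFunnyLoop_eq_all, List.all_eq_true]
  constructor
  · intro h i hi
    have := h i (List.mem_range.mpr hi)
    rw [beq_iff_eq] at this
    rw [this, pvDiff_reverse cs i (by omega)]
  · intro h i hi
    have him := List.mem_range.mp hi
    rw [beq_iff_eq, pvDiff_reverse cs i (by omega)]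
    exact h i him

-- B's two-pointer invariant
theorem twoPtr_iff (cs : List Char) (lo hi : Nat) :
    twoPtr cs lo hi = true
      ↔ ∀ i, lo ≤ i → 2 * i < lo + hi → pvDiff cs i = pvDiff cs (lo + hi - i) := by
  induction lo, hi using twoPtr.induct cs with
  | case1 lo hi hlt hne =>
    rw [twoPtr]
    simp only [if_pos hlt, if_pos hne]
    constructor
    · intro h; exact absurd h (by simp)
    · intro h
      exact absurd (h lo le_rfl (by omega)) (by simpa using hne)
  | case2 lo hi hlt hne ih =>
    rw [twoPtr]
    simp only [if_pos hlt, if_neg hne]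
    rw [ih]
    have heq : pvDiff cs lo = pvDiff cs hi := by
      by_contra hc; exact hne hc
    constructor
    · intro h i hle hlt2
      rcases Nat.lt_or_ge lo i with hi2 | hi2
      · have := h i (by omega) (by omega)
        rwa [show lo + 1 + (hi - 1) - i = lo + hi - i by omega] at this
      · have hil : i = lo := by omega
        rw [hil, show lo + hi - lo = hi by omega]
        exact heq
    · intro h i hle hlt2
      have := h i (by omega) (by omega)
      rwa [show lo + hi - i = lo + 1 + (hi - 1) - i by omega] at this
  | case3 lo hi hlt =>
    rw [twoPtr]
    simp only [if_neg hlt]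
    constructor
    · intro _ i hle hlt2; omega
    · intro _; trivial

-- the half check of B implies the full palindrome check of A
theorem half_iff_full (cs : List Char) (hlen : 1 < cs.length) :
    (∀ i, 0 ≤ i → 2 * i < 0 + (cs.length - 2) → pvDiff cs i = pvDiff cs (0 + (cs.length - 2) - i))
      ↔ ∀ i < cs.length - 1, pvDiff cs i = pvDiff cs (cs.length - 2 - i) := by
  set n := cs.length with hn
  constructor
  · intro h i hi
    rcases Nat.lt_trichotomy (2 * i) (n - 2) with hc | hc | hc
    · have := h i (by omega) (by omega)
      rwa [show 0 + (n - 2) - i = n - 2 - i by omega] at this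
    · have : n - 2 - i = i := by omega
      rw [this]
    · have hj : 2 * (n - 2 - i) < n - 2 := by omega
      have := h (n - 2 - i) (by omega) (by omega)
      rw [show 0 + (n - 2) - (n - 2 - i) = i by omega] at this
      exact this.symm
  · intro h i _ hlt2
    have := h i (by omega)
    rwa [show 0 + (n - 2) - i = n - 2 - i by omega]

-- ===== VERDICT (by name: the statement is the Claim_ definition above) =====
theorem is_funny_spec : Claim_equal_is_funny := by
  intro word _ hpre
  unfold Spec_is_funny is_funny is_funny_alt
  set cs := word.toList with hcs
  have hA := funnyA_iff cs
  have hB := (twoPtr_iff cs 0 (cs.length - 2)).trans (half_iff_full cs hpre)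
  have : (isFunnyLoop cs cs.reverse (List.range (cs.length - 1)) = true)
      ↔ (twoPtr cs 0 (cs.length - 2) = true) := hA.trans hB.symm
  cases hx : isFunnyLoop cs cs.reverse (List.range (cs.length - 1)) <;>
    cases hy : twoPtr cs 0 (cs.length - 2) <;>
      simp_all
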